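-- pv_equiv track=rewrite | github.com/tomgstanton/adventofcode | 2015/Day 03/code_part1.py | HouseCounter
-- ===== SOURCE A (Python) =====
-- dict = {'^':[0,1],
--     '>':[1,0],
--     'v':[0,-1],
--     '<':[-1,0]}
--
-- def DecodeMovement(character):
--     output = dict[character]
--     return output
--
-- def HouseCounter(string):
--     output = []
--     location = [0,0]
--     for character in string:
--         movement = DecodeMovement(character)
--         location = [x+y for x,y in zip(location,movement)]
--         output.append(location)
--     return output
-- ===== SOURCE B (Python) =====
-- _moves = {'^': (0, 1), '>': (1, 0), 'v': (0, -1), '<': (-1, 0)}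
--
-- def _prefix_sums(vals):
--     sums = []
--     total = 0
--     for v in vals:
--         total += v
--         sums.append(total)
--     return sums
--
-- def HouseCounter(string):
--     dxs = _prefix_sums([_moves[c][0] for c in string])
--     dys = _prefix_sums([_moves[c][1] for c in string])
--     return [[x, y] for x, y in zip(dxs, dys)]
-- ===== Notes on version B (the rewrite author's own statement) =====
-- stated objective: alternative
-- what changed: B replaces the single fused loop carrying one running [x,y] position with two independent per-axis prefix-sum passes over the delta lists, zipped into pairs at the end.
import Mathlib
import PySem

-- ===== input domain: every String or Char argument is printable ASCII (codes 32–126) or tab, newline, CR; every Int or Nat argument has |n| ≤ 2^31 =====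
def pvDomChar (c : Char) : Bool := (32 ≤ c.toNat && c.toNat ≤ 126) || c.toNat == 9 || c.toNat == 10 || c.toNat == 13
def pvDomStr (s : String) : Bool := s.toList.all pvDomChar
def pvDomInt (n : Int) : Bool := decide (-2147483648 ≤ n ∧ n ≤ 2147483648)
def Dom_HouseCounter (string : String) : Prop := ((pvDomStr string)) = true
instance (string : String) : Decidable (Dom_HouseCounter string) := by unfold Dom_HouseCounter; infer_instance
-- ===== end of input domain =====

-- B replaces the single fused loop carrying one running [x,y] position with two
-- independent per-axis prefix-sum passes over the delta lists, zipped at the end.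

-- ===== PORT A =====
-- the module-level dict of A
def pyMoveDict : PySem.Dict Char (List Int) :=
  PySem.Dict.ofList [('^', [0, 1]), ('>', [1, 0]), ('v', [0, -1]), ('<', [-1, 0])]

-- dict[character]; KeyError (unknown char) is excluded by Pre_, default is unreachable there
def DecodeMovement (character : Char) : List Int :=
  (PySem.Dict.get? pyMoveDict character).getD []

def HouseCounter (string : String) : List (List Int) :=
  (string.toList.foldl
    (fun (st : List (List Int) × List Int) character =>
      let movement := DecodeMovement character
      let location := (st.2.zip movement).map (fun p => p.1 + p.2)
      (st.1 ++ [location], location))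
    ([], [0, 0])).1

-- ===== PORT B =====
def movesB : PySem.Dict Char (Int × Int) :=
  PySem.Dict.ofList [('^', (0, 1)), ('>', (1, 0)), ('v', (0, -1)), ('<', (-1, 0))]

-- _moves[c]; KeyError excluded by Pre_, default unreachable there
def moveB (c : Char) : Int × Int := (PySem.Dict.get? movesB c).getD (0, 0)

def prefixSums (vals : List Int) : List Int :=
  (vals.foldl (fun (st : List Int × Int) v =>
      let total := st.2 + v
      (st.1 ++ [total], total)) ([], 0)).1

def HouseCounter_alt (string : String) : List (List Int) :=
  let dxs := prefixSums (string.toList.map (fun c => (moveB c).1))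
  let dys := prefixSums (string.toList.map (fun c => (moveB c).2))
  (dxs.zip dys).map (fun p => [p.1, p.2])

-- ===== PRECONDITION & SPEC =====
-- Pre_ excludes exactly the strings containing a character outside '^>v<',
-- on which A (and B) raise KeyError.
def Pre_HouseCounter (string : String) : Prop :=
  (string.toList.all (fun c => c == '^' || c == '>' || c == 'v' || c == '<')) = true
instance (string : String) : Decidable (Pre_HouseCounter string) := by
  unfold Pre_HouseCounter; infer_instance

def pvWitness_HouseCounter : String := "^>v<"

def Spec_HouseCounter (string : String) (out : List (List Int)) : Prop := out = HouseCounter_alt string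
instance (string : String) (out : List (List Int)) : Decidable (Spec_HouseCounter string out) := by unfold Spec_HouseCounter; infer_instance

-- ===== CLAIM (what is proved, stated in full; the proofs are below) =====
def Claim_equal_HouseCounter : Prop := ∀ (string : String), Dom_HouseCounter string → Pre_HouseCounter string → Spec_HouseCounter string (HouseCounter string)

-- ===== LEMMAS AND PROOFS =====

lemma dec_up : DecodeMovement '^' = [0, 1] := by decide
lemma dec_rt : DecodeMovement '>' = [1, 0] := by decide
lemma dec_dn : DecodeMovement 'v' = [0, -1] := by decide
lemma dec_lt : DecodeMovement '<' = [-1, 0] := by decide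
lemma mv_up : moveB '^' = (0, 1) := by decide
lemma mv_rt : moveB '>' = (1, 0) := by decide
lemma mv_dn : moveB 'v' = (0, -1) := by decide
lemma mv_lt : moveB '<' = (-1, 0) := by decide

-- common reference walk
def pvWalk (x y : Int) : List Char → List (List Int)
  | [] => []
  | c :: cs =>
    let m := DecodeMovement c
    let dx := (PySem.List.pyGet? m 0).getD 0
    let dy := (PySem.List.pyGet? m 1).getD 0
    [x + dx, y + dy] :: pvWalk (x + dx) (y + dy) cs

lemma walkA (cs : List Char) :
    ∀ (x y : Int) (acc : List (List Int)),
    (∀ c ∈ cs, c = '^' ∨ c = '>' ∨ c = 'v' ∨ c = '<') →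
    (cs.foldl
      (fun (st : List (List Int) × List Int) character =>
        let movement := DecodeMovement character
        let location := (st.2.zip movement).map (fun p => p.1 + p.2)
        (st.1 ++ [location], location))
      (acc, [x, y])).1 = acc ++ pvWalk x y cs := by
  induction cs with
  | nil => intro x y acc _; simp [pvWalk]
  | cons c cs ih =>
    intro x y acc h
    have hc := h c (List.mem_cons_self)
    have ht : ∀ c' ∈ cs, c' = '^' ∨ c' = '>' ∨ c' = 'v' ∨ c' = '<' :=
      fun c' hm => h c' (List.mem_cons_of_mem _ hm)
    rcases hc with rfl | rfl | rfl | rfl <;>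
      simp [List.foldl_cons, pvWalk, dec_up, dec_rt, dec_dn, dec_lt,
        PySem.List.pyGet?, PySem.List.pyIdx?, ih _ _ _ ht]

lemma prefixSums_go (vs : List Int) :
    ∀ (t : Int) (acc : List Int),
    (vs.foldl (fun (st : List Int × Int) v =>
        let total := st.2 + v
        (st.1 ++ [total], total)) (acc, t)).1
      = acc ++ (vs.foldl (fun (st : List Int × Int) v =>
        let total := st.2 + v
        (st.1 ++ [total], total)) ([], t)).1 := by
  induction vs with
  | nil => intro t acc; simp
  | cons v vs ih =>
    intro t acc
    simp only [List.foldl_cons]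
    rw [ih (t + v) (acc ++ [t + v]), ih (t + v) ([] ++ [t + v])]
    simp

lemma walkB (cs : List Char) :
    ∀ (x y : Int),
    (∀ c ∈ cs, c = '^' ∨ c = '>' ∨ c = 'v' ∨ c = '<') →
    (((cs.map (fun c => (moveB c).1)).foldl (fun (st : List Int × Int) v =>
        let total := st.2 + v
        (st.1 ++ [total], total)) ([], x)).1.zip
     ((cs.map (fun c => (moveB c).2)).foldl (fun (st : List Int × Int) v =>
        let total := st.2 + v
        (st.1 ++ [total], total)) ([], y)).1).map (fun p => [p.1, p.2])
      = pvWalk x y cs := by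
  induction cs with
  | nil => intro x y _; simp [pvWalk]
  | cons c cs ih =>
    intro x y h
    have hc := h c (List.mem_cons_self)
    have ht : ∀ c' ∈ cs, c' = '^' ∨ c' = '>' ∨ c' = 'v' ∨ c' = '<' :=
      fun c' hm => h c' (List.mem_cons_of_mem _ hm)
    rcases hc with rfl | rfl | rfl | rfl <;>
    · simp only [List.map_cons, List.foldl_cons]
      rw [prefixSums_go _ _ ([] ++ [_]), prefixSums_go _ _ ([] ++ [_])]
      simp only [mv_up, mv_rt, mv_dn, mv_lt, pvWalk, dec_up, dec_rt, dec_dn, dec_lt,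
        PySem.List.pyGet?, PySem.List.pyIdx?]
      simp [ih _ _ ht]

-- ===== VERDICT (by name: the statement is the Claim_ definition above) =====
theorem HouseCounter_spec : Claim_equal_HouseCounter := by
  intro s _ hpre
  have hpre' : ∀ c ∈ s.toList, c = '^' ∨ c = '>' ∨ c = 'v' ∨ c = '<' := by
    intro c hc
    have h4 := List.all_eq_true.mp hpre c hc
    simp at h4
    tauto
  show HouseCounter s = HouseCounter_alt s
  unfold HouseCounter HouseCounter_alt prefixSums
  rw [walkA s.toList 0 0 [] hpre', walkB s.toList 0 0 hpre']
  simp
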